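-- pv_equiv track=rewrite | github.com/WilSonS9/AoC2023 | 22.1.py | dropBricks
-- ===== SOURCE A (Python) =====
-- def dropBricks(bricks):
--     newBricks = []
--
--     coordBrickMap = {}
--     supportedBy   = {i: set() for i in range(len(bricks))}
--     supports      = {i: set() for i in range(len(bricks))}
--
--     occupiedPositions = set()
--
--     for i,brick in enumerate(bricks):
--         currentCoordinates = brick.copy()
--
--         cont = True
--         while cont:
--
--             # try to decrease all z by one
--             canDecrease = True
--             newCoords   = []
--             for coord in currentCoordinates:
--                 x, y, z  = coord
--                 newCoord = (x, y, z - 1)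
--
--                 if z - 1 < 1:
--                     cont        = False
--                     canDecrease = False
--                     break
--                 elif newCoord in occupiedPositions:
--                     canDecrease     = False
--                     cont            = False
--                     supportingBrick = coordBrickMap[newCoord]
--                     supportedBy[i].add(supportingBrick)
--                     supports[supportingBrick].add(i)
--
--                 newCoords.append(newCoord)
--
--             if canDecrease:
--                 currentCoordinates = newCoords.copy()
--
--         for coord in currentCoordinates:
--             occupiedPositions.add(coord)
--             coordBrickMap[coord] = i
--
--         newBricks.append(currentCoordinates)
--
--     return newBricks, supportedBy, supports
-- ===== SOURCE B (Python) =====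
-- def dropBricks(bricks):
--     # Per-column map (x,y) -> {z: brick id}; resting height found in one
--     # closed-form pass per cell instead of unit-by-unit descent.
--     newBricks   = []
--     supportedBy = {i: set() for i in range(len(bricks))}
--     supports    = {i: set() for i in range(len(bricks))}
--
--     columns = {}
--
--     for i, brick in enumerate(bricks):
--         # closed-form drop: each cell may fall to the floor (z = 1) or onto
--         # the highest occupied cell strictly below it in its column
--         drop = None
--         for (x, y, z) in brick:
--             d = z - 1 if z - 1 >= 0 else 0
--             for zp in columns.get((x, y), ()):
--                 if zp < z and z - 1 - zp < d:
--                     d = z - 1 - zp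
--             if drop is None or d < drop:
--                 drop = d
--
--         rest = [(x, y, z - drop) for (x, y, z) in brick]
--
--         # the bricks one cell below the resting position are the supporters
--         for (x, y, z) in rest:
--             if z - 1 < 1:
--                 break
--             j = columns.get((x, y), {}).get(z - 1)
--             if j is not None:
--                 supportedBy[i].add(j)
--                 supports[j].add(i)
--
--         for (x, y, z) in rest:
--             columns.setdefault((x, y), {})[z] = i
--
--         newBricks.append(rest)
--
--     return newBricks, supportedBy, supports
-- ===== Notes on version B (the rewrite author's own statement) =====
-- stated objective: alternative
-- what changed: A lowers each brick one z-step at a time, rescanning every cell per step against a global occupied-cell set; B keeps a per-column (x,y) -> {z: brick} map and computes each brick's resting drop in closed form in one pass over its cells (drop to floor or to the nearest occupied cell below), then reads the supporters directly under the resting cells.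
import Mathlib
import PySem

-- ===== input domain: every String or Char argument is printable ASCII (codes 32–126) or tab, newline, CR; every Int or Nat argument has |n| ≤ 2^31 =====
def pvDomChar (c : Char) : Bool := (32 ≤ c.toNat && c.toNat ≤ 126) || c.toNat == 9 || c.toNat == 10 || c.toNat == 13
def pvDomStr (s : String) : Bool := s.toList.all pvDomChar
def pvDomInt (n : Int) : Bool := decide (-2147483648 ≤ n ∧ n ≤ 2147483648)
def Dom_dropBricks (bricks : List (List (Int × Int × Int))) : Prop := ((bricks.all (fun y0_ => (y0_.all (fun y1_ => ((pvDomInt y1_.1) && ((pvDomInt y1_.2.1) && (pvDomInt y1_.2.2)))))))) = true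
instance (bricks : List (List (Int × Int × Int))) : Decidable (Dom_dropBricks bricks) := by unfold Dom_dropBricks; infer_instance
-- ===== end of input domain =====

-- B replaces A's unit-by-unit descent of every brick with a per-column occupancy
-- map and a closed-form drop per cell (no step-by-step simulation); same cost class.
-- A (Python) mutates nothing observable; equivalence is about the return value.

-- ===== PORT A =====
-- A-side helper: one pass of the inner `for coord in currentCoordinates` loop.
-- State: (canDecrease(=cont), newCoords, supportedBy, supports).
def pvPassA (i : Int) (occupied : PySem.Set (Int × Int × Int))
    (cbm : PySem.Dict (Int × Int × Int) Int) (cd : Bool)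
    (coords acc : List (Int × Int × Int))
    (sb sp : PySem.Dict Int (PySem.Set Int)) :
    Bool × List (Int × Int × Int) × PySem.Dict Int (PySem.Set Int) × PySem.Dict Int (PySem.Set Int) :=
  match coords with
  | [] => (cd, acc, sb, sp)
  | (x, y, z) :: rest =>
    if z - 1 < 1 then
      (false, acc, sb, sp)                                   -- break
    else if PySem.Set.contains occupied (x, y, z - 1) then
      -- supportingBrick = coordBrickMap[newCoord]; the key is always present
      -- when the coordinate is in occupiedPositions (they are added together)
      let j := (cbm.get? (x, y, z - 1)).getD 0
      pvPassA i occupied cbm false rest (acc ++ [(x, y, z - 1)])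
        (sb.modify i [] (fun s => PySem.Set.add s j))
        (sp.modify j [] (fun s => PySem.Set.add s i))
    else
      pvPassA i occupied cbm cd rest (acc ++ [(x, y, z - 1)]) sb sp

-- cited (via pvPassA_true_shape) by pvSettleA's decreasing_by
theorem pvPassA_false (i : Int) (occupied : PySem.Set (Int × Int × Int))
    (cbm : PySem.Dict (Int × Int × Int) Int) :
    ∀ (coords acc : List (Int × Int × Int)) (sb sp : PySem.Dict Int (PySem.Set Int)),
      (pvPassA i occupied cbm false coords acc sb sp).1 = false := by
  intro coords
  induction coords with
  | nil => intro acc sb sp; rfl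
  | cons c rest ih =>
    intro acc sb sp
    obtain ⟨x, y, z⟩ := c
    simp only [pvPassA]
    split
    · rfl
    · split
      · exact ih _ _ _
      · exact ih _ _ _

-- cited by pvSettleA's decreasing_by: a successful pass shifted every z by -1
-- and every z was ≥ 2
theorem pvPassA_true_shape (i : Int) (occupied : PySem.Set (Int × Int × Int))
    (cbm : PySem.Dict (Int × Int × Int) Int) :
    ∀ (coords acc : List (Int × Int × Int)) (cd : Bool)
      (sb sp : PySem.Dict Int (PySem.Set Int)),
      (pvPassA i occupied cbm cd coords acc sb sp).1 = true →
      (pvPassA i occupied cbm cd coords acc sb sp).2.1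
        = acc ++ coords.map (fun c => (c.1, c.2.1, c.2.2 - 1))
      ∧ ∀ c ∈ coords, 2 ≤ c.2.2 := by
  intro coords
  induction coords with
  | nil => intro acc cd sb sp _; simp [pvPassA]
  | cons c rest ih =>
    intro acc cd sb sp h
    obtain ⟨x, y, z⟩ := c
    simp only [pvPassA] at h ⊢
    split at h
    · simp at h
    · split at h
      · rw [pvPassA_false] at h; simp at h
      · rename_i hz hocc
        rw [if_neg hz, if_neg hocc]
        have := ih (acc ++ [(x, y, z - 1)]) cd sb sp h
        refine ⟨?_, ?_⟩
        · simp only [List.map_cons, this.1, List.append_assoc, List.singleton_append]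
        · intro c hc
          rcases List.mem_cons.mp hc with hc | hc
          · subst hc; simp only; omega
          · exact this.2 c hc

-- A-side helper: the `while cont` loop.  On an empty coordinate list the
-- Python loop never terminates; the empty case is a totality guard (outside Pre_).
def pvSettleA (i : Int) (occupied : PySem.Set (Int × Int × Int))
    (cbm : PySem.Dict (Int × Int × Int) Int)
    (coords : List (Int × Int × Int))
    (sb sp : PySem.Dict Int (PySem.Set Int)) :
    List (Int × Int × Int) × PySem.Dict Int (PySem.Set Int) × PySem.Dict Int (PySem.Set Int) :=
  match hc : coords with
  | [] => (coords, sb, sp)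
  | _ :: _ =>
    let r := pvPassA i occupied cbm true coords [] sb sp
    if hr : r.1 = true then
      pvSettleA i occupied cbm r.2.1 r.2.2.1 r.2.2.2
    else
      (coords, r.2.2.1, r.2.2.2)
termination_by (coords.head?.elim 0 (fun c => c.2.2)).toNat
decreasing_by
  · have h := pvPassA_true_shape i occupied cbm coords [] true sb sp hr
    subst hc
    rename_i c cs
    have h2 : 2 ≤ c.2.2 := h.2 c (by simp)
    simp [h.1]
    omega

-- A-side helper: body of `for i,brick in enumerate(bricks)`
def pvLoopA (items : List (Int × List (Int × Int × Int)))
    (nb : List (List (Int × Int × Int)))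
    (occupied : PySem.Set (Int × Int × Int))
    (cbm : PySem.Dict (Int × Int × Int) Int)
    (sb sp : PySem.Dict Int (PySem.Set Int)) :
    List (List (Int × Int × Int)) × PySem.Dict Int (PySem.Set Int) × PySem.Dict Int (PySem.Set Int) :=
  match items with
  | [] => (nb, sb, sp)
  | (i, brick) :: rest =>
    let r := pvSettleA i occupied cbm brick sb sp
    let oc := r.1.foldl (fun (oc : PySem.Set (Int × Int × Int) × PySem.Dict (Int × Int × Int) Int) c =>
      (PySem.Set.add oc.1 c, oc.2.insert c i)) (occupied, cbm)
    pvLoopA rest (nb ++ [r.1]) oc.1 oc.2 r.2.1 r.2.2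

-- A-side helper: {i: set() for i in range(len(bricks))}
def pvInitA (n : Int) : PySem.Dict Int (PySem.Set Int) :=
  (PySem.List.pyRange 0 n 1).foldl (fun d i => d.insert i PySem.Set.empty) PySem.Dict.empty

def dropBricks (bricks : List (List (Int × Int × Int))) :
    (List (List (Int × Int × Int))) × (List (Int × List Int)) × (List (Int × List Int)) :=
  let supportedBy := pvInitA (bricks.length : Int)
  let supports := pvInitA (bricks.length : Int)
  let r := pvLoopA (PySem.List.enumerate bricks) [] PySem.Set.empty PySem.Dict.empty supportedBy supports
  (r.1, r.2.1.items, r.2.2.items)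

-- ===== PORT B =====
-- B-side helper: closed-form drop of one cell, `d` folded over the z-keys of
-- the cell's column (`for zp in columns.get((x, y), ())`)
def pvDCellB (cols : PySem.Dict (Int × Int) (PySem.Dict Int Int)) (x y z : Int) : Int :=
  let d0 : Int := if 0 ≤ z - 1 then z - 1 else 0
  let ks : List Int := (cols.get? (x, y)).elim [] PySem.Dict.keys
  ks.foldl (fun d zp => if zp < z && z - 1 - zp < d then z - 1 - zp else d) d0

-- B-side helper: `drop` accumulated over the brick's cells (None = not yet set)
def pvDropB (cols : PySem.Dict (Int × Int) (PySem.Dict Int Int))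
    (brick : List (Int × Int × Int)) : Option Int :=
  brick.foldl (fun acc c =>
    let d := pvDCellB cols c.1 c.2.1 c.2.2
    match acc with
    | none => some d
    | some dr => some (if d < dr then d else dr)) none

-- B-side helper: the supporter scan over the resting cells (with break)
def pvScanB (i : Int) (cols : PySem.Dict (Int × Int) (PySem.Dict Int Int))
    (cells : List (Int × Int × Int))
    (sb sp : PySem.Dict Int (PySem.Set Int)) :
    PySem.Dict Int (PySem.Set Int) × PySem.Dict Int (PySem.Set Int) :=
  match cells with
  | [] => (sb, sp)
  | (x, y, z) :: rest =>
    if z - 1 < 1 then (sb, sp)                               -- break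
    else
      match ((cols.get? (x, y)).getD PySem.Dict.empty).get? (z - 1) with
      | some j =>
        pvScanB i cols rest
          (sb.modify i [] (fun s => PySem.Set.add s j))
          (sp.modify j [] (fun s => PySem.Set.add s i))
      | none => pvScanB i cols rest sb sp

-- B-side helper: `columns.setdefault((x, y), {})[z] = i` for every resting cell
-- (the in-place inner update keeps the outer key's position = Dict.insert)
def pvPlaceB (i : Int) (cols : PySem.Dict (Int × Int) (PySem.Dict Int Int))
    (cells : List (Int × Int × Int)) : PySem.Dict (Int × Int) (PySem.Dict Int Int) :=
  cells.foldl (fun k c =>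
    k.insert (c.1, c.2.1) ((k.getD (c.1, c.2.1) PySem.Dict.empty).insert c.2.2 i)) cols

-- B-side helper: body of `for i, brick in enumerate(bricks)`
def pvLoopB (items : List (Int × List (Int × Int × Int)))
    (nb : List (List (Int × Int × Int)))
    (cols : PySem.Dict (Int × Int) (PySem.Dict Int Int))
    (sb sp : PySem.Dict Int (PySem.Set Int)) :
    List (List (Int × Int × Int)) × PySem.Dict Int (PySem.Set Int) × PySem.Dict Int (PySem.Set Int) :=
  match items with
  | [] => (nb, sb, sp)
  | (i, brick) :: rest =>
    -- Python raises TypeError on `z - None` for an empty brick; `.getD 0` is a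
    -- totality guard (outside Pre_)
    let drop := (pvDropB cols brick).getD 0
    let rst := brick.map (fun c => (c.1, c.2.1, c.2.2 - drop))
    let r := pvScanB i cols rst sb sp
    pvLoopB rest (nb ++ [rst]) (pvPlaceB i cols rst) r.1 r.2

-- B-side helper: {i: set() for i in range(len(bricks))}
def pvInitB (n : Int) : PySem.Dict Int (PySem.Set Int) :=
  (PySem.List.pyRange 0 n 1).foldl (fun d i => d.insert i PySem.Set.empty) PySem.Dict.empty

def dropBricks_alt (bricks : List (List (Int × Int × Int))) :
    (List (List (Int × Int × Int))) × (List (Int × List Int)) × (List (Int × List Int)) :=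
  let supportedBy := pvInitB (bricks.length : Int)
  let supports := pvInitB (bricks.length : Int)
  let r := pvLoopB (PySem.List.enumerate bricks) [] PySem.Dict.empty supportedBy supports
  (r.1, r.2.1.items, r.2.2.items)

-- ===== PRECONDITION & SPEC =====
-- Pre_ excludes bricks containing an empty cell list: there Python A's
-- `while cont` loop never terminates (no cell ever blocks the descent).
def Pre_dropBricks (bricks : List (List (Int × Int × Int))) : Prop :=
  ∀ b ∈ bricks, b ≠ []
instance (bricks : List (List (Int × Int × Int))) : Decidable (Pre_dropBricks bricks) := by
  unfold Pre_dropBricks; infer_instance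

def pvWitness_dropBricks : List (List (Int × Int × Int)) :=
  [[(0, 0, 1), (0, 1, 1)], [(0, 0, 5)], [(0, 0, 7), (0, 1, 7)]]

def Spec_dropBricks (bricks : List (List (Int × Int × Int)))
    (out : (List (List (Int × Int × Int))) × (List (Int × List Int)) × (List (Int × List Int))) : Prop :=
  out = dropBricks_alt bricks
instance (bricks : List (List (Int × Int × Int)))
    (out : (List (List (Int × Int × Int))) × (List (Int × List Int)) × (List (Int × List Int))) :
    Decidable (Spec_dropBricks bricks out) := by unfold Spec_dropBricks; infer_instance

-- ===== CLAIM (what is proved, stated in full; the proofs are below) =====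
def Claim_equal_dropBricks : Prop := ∀ (bricks : List (List (Int × Int × Int))), Dom_dropBricks bricks → Pre_dropBricks bricks → Spec_dropBricks bricks (dropBricks bricks)

-- ===== LEMMAS AND PROOFS =====

-- lookup of one 3-D coordinate through the column map
def pvLook (cols : PySem.Dict (Int × Int) (PySem.Dict Int Int)) (x y z : Int) : Option Int :=
  ((cols.get? (x, y)).getD PySem.Dict.empty).get? z

-- specification of a single cell's drop: unit descent until floor or occupied
def pvDSpec (cols : PySem.Dict (Int × Int) (PySem.Dict Int Int)) (x y z : Int) : Int :=
  if z - 1 < 1 then 0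
  else if (pvLook cols x y (z - 1)).isSome then 0
  else 1 + pvDSpec cols x y (z - 1)
termination_by z.toNat
decreasing_by omega

def pvDMin (cols : PySem.Dict (Int × Int) (PySem.Dict Int Int)) :
    List (Int × Int × Int) → Int
  | [] => 0
  | c :: cs => cs.foldl (fun m c' => min m (pvDSpec cols c'.1 c'.2.1 c'.2.2))
      (pvDSpec cols c.1 c.2.1 c.2.2)

-- coupling invariant between A's state (occupied set + coord→brick dict) and
-- B's column map
def pvInv (occ : PySem.Set (Int × Int × Int)) (cbm : PySem.Dict (Int × Int × Int) Int)
    (cols : PySem.Dict (Int × Int) (PySem.Dict Int Int)) : Prop :=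
  ∀ x y z : Int, cbm.get? (x, y, z) = pvLook cols x y z
    ∧ PySem.Set.contains occ (x, y, z) = (pvLook cols x y z).isSome

theorem pvDSpec_nonneg (cols : PySem.Dict (Int × Int) (PySem.Dict Int Int))
    (x y z : Int) : 0 ≤ pvDSpec cols x y z := by
  induction z using pvDSpec.induct cols x y with
  | case1 z h => rw [pvDSpec, if_pos h]
  | case2 z h1 h2 => rw [pvDSpec, if_neg h1, if_pos h2]
  | case3 z h1 h2 ih => rw [pvDSpec, if_neg h1, if_neg h2]; omega

theorem pv_foldl_min_filterMap (z : Int) :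
    ∀ (zs : List Int) (d : Int),
      zs.foldl (fun d zp => if zp < z && z - 1 - zp < d then z - 1 - zp else d) d
        = (zs.filterMap (fun zp => if zp < z then some (z - 1 - zp) else none)).foldl min d := by
  intro zs
  induction zs with
  | nil => intro d; rfl
  | cons a l ih =>
    intro d
    by_cases h : a < z
    · simp only [List.foldl_cons, List.filterMap_cons, if_pos h]
      rw [ih]
      congr 1
      by_cases hlt : z - 1 - a < d
      · have hc : (a < z && z - 1 - a < d) = true := by simp [h, hlt]
        rw [hc, if_pos rfl]
        exact (min_eq_right (by omega)).symm
      · have hc : (a < z && z - 1 - a < d) = false := by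
          simp only [Bool.and_eq_false_iff, decide_eq_false_iff_not]; right; exact hlt
        rw [hc, if_neg (by simp)]
        exact (min_eq_left (by omega)).symm
    · simp only [List.foldl_cons, List.filterMap_cons, if_neg h]
      rw [ih]
      congr 1
      have hc : (a < z && z - 1 - a < d) = false := by
        simp only [Bool.and_eq_false_iff, decide_eq_false_iff_not]; left; exact h
      rw [hc, if_neg (by simp)]

theorem pv_foldl_min_init_le :
    ∀ (l : List Int) (d : Int), (∀ a ∈ l, d ≤ a) → l.foldl min d = d := by
  intro l
  induction l with
  | nil => intro d _; rfl
  | cons a l ih =>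
    intro d h
    simp only [List.foldl_cons]
    have hd : min d a = d := by have := h a (by simp); omega
    rw [hd]
    exact ih d (fun b hb => h b (by simp [hb]))

theorem pv_foldl_min_le_init : ∀ (l : List Int) (d : Int), l.foldl min d ≤ d := by
  intro l
  induction l with
  | nil => intro d; exact le_refl d
  | cons a l ih =>
    intro d
    simp only [List.foldl_cons]
    have := ih (min d a)
    omega

theorem pv_foldl_min_le_mem :
    ∀ (l : List Int) (d a : Int), a ∈ l → l.foldl min d ≤ a := by
  intro l
  induction l with
  | nil => intro d a h; cases h
  | cons b l ih =>
    intro d a h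
    rcases List.mem_cons.mp h with h | h
    · subst h
      simp only [List.foldl_cons]
      have := pv_foldl_min_le_init l (min d a)
      omega
    · exact ih _ _ h

theorem pv_foldl_min_nonneg :
    ∀ (l : List Int) (d : Int), (∀ a ∈ l, 0 ≤ a) → 0 ≤ d → 0 ≤ l.foldl min d := by
  intro l
  induction l with
  | nil => intro d _ hd; exact hd
  | cons a l ih =>
    intro d h hd
    simp only [List.foldl_cons]
    refine ih _ (fun b hb => h b (by simp [hb])) ?_
    have := h a (by simp)
    omega

theorem pv_foldl_min_map_add_one :
    ∀ (l : List Int) (d : Int),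
      (l.map (fun a => 1 + a)).foldl min (1 + d) = 1 + l.foldl min d := by
  intro l
  induction l with
  | nil => intro d; rfl
  | cons a l ih =>
    intro d
    simp only [List.map_cons, List.foldl_cons]
    rw [show min (1 + d) (1 + a) = 1 + min d a by omega]
    exact ih _

theorem pv_filterMap_shift (z : Int) :
    ∀ (ks : List Int), (∀ zp ∈ ks, zp ≠ z - 1) →
      ks.filterMap (fun zp => if zp < z then some (z - 1 - zp) else none)
        = (ks.filterMap (fun zp => if zp < z - 1 then some (z - 1 - 1 - zp) else none)).map
            (fun a => 1 + a) := by
  intro ks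
  induction ks with
  | nil => intro _; rfl
  | cons a l ih =>
    intro h
    have ha : a ≠ z - 1 := h a (by simp)
    have hrest : ∀ zp ∈ l, zp ≠ z - 1 := fun zp hzp => h zp (by simp [hzp])
    by_cases h1 : a < z - 1
    · simp only [List.filterMap_cons, if_pos h1, if_pos (by omega : a < z), List.map_cons]
      rw [ih hrest]
      congr 1
      omega
    · have h2 : ¬ a < z := by omega
      simp only [List.filterMap_cons, if_neg h1, if_neg h2]
      exact ih hrest

-- the z-keys list pvDCellB folds over, and its relation to pvLook
theorem pv_mem_ks_iff (cols : PySem.Dict (Int × Int) (PySem.Dict Int Int)) (x y w : Int) :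
    (w ∈ (cols.get? (x, y)).elim [] PySem.Dict.keys) ↔ (pvLook cols x y w).isSome := by
  unfold pvLook
  cases hc : cols.get? (x, y) with
  | none => simp [PySem.Dict.get?_empty]
  | some col =>
    simp only [Option.elim_some, Option.getD_some]
    rw [← PySem.Dict.contains_iff_mem_keys, PySem.Dict.contains_eq_isSome_get?]

theorem pvDCellB_eq_dSpec (cols : PySem.Dict (Int × Int) (PySem.Dict Int Int))
    (x y z : Int) : pvDCellB cols x y z = pvDSpec cols x y z := by
  induction z using pvDSpec.induct cols x y with
  | case1 z h =>
    rw [pvDSpec, if_pos h]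
    unfold pvDCellB
    rw [pv_foldl_min_filterMap]
    rw [show (if 0 ≤ z - 1 then z - 1 else 0) = 0 by split <;> omega]
    apply pv_foldl_min_init_le
    intro a ha
    rcases List.mem_filterMap.mp ha with ⟨zp, _, hzp⟩
    split at hzp
    · rename_i hlt; cases hzp; omega
    · cases hzp
  | case2 z h1 h2 =>
    rw [pvDSpec, if_neg h1, if_pos h2]
    unfold pvDCellB
    rw [pv_foldl_min_filterMap]
    have hmem : (z - 1) ∈ (cols.get? (x, y)).elim [] PySem.Dict.keys :=
      (pv_mem_ks_iff cols x y (z - 1)).mpr h2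
    have h0mem : (0 : Int) ∈ ((cols.get? (x, y)).elim [] PySem.Dict.keys).filterMap
        (fun zp => if zp < z then some (z - 1 - zp) else none) := by
      apply List.mem_filterMap.mpr
      exact ⟨z - 1, hmem, by rw [if_pos (by omega)]; congr 1; omega⟩
    apply le_antisymm
    · exact pv_foldl_min_le_mem _ _ _ h0mem
    · apply pv_foldl_min_nonneg
      · intro a ha
        rcases List.mem_filterMap.mp ha with ⟨zp, _, hzp⟩
        split at hzp
        · rename_i hlt; cases hzp; omega
        · cases hzp
      · split <;> omega
  | case3 z h1 h2 ih =>
    rw [pvDSpec, if_neg h1, if_neg h2, ← ih]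
    unfold pvDCellB
    rw [pv_foldl_min_filterMap, pv_foldl_min_filterMap]
    have hnm : ∀ zp ∈ (cols.get? (x, y)).elim [] PySem.Dict.keys, zp ≠ z - 1 := by
      intro zp hzp hne
      subst hne
      rw [pv_mem_ks_iff] at hzp
      simp [hzp] at h2
    rw [pv_filterMap_shift z _ hnm]
    rw [show (if 0 ≤ z - 1 then z - 1 else 0) = 1 + (if 0 ≤ z - 1 - 1 then z - 1 - 1 else 0) by
      split <;> split <;> omega]
    exact pv_foldl_min_map_add_one _ _

-- folding `min m (f c)` is folding `min` over the mapped list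
theorem pv_foldl_min_comp (f : (Int × Int × Int) → Int) :
    ∀ (cs : List (Int × Int × Int)) (d : Int),
      cs.foldl (fun m c => min m (f c)) d = (cs.map f).foldl min d := by
  intro cs
  induction cs with
  | nil => intro d; rfl
  | cons c cs ih =>
    intro d
    simp only [List.foldl_cons, List.map_cons]
    exact ih _

theorem pv_foldl_min_attains :
    ∀ (l : List Int) (d : Int), l.foldl min d = d ∨ ∃ a ∈ l, l.foldl min d = a := by
  intro l
  induction l with
  | nil => intro d; left; rfl
  | cons a l ih =>
    intro d
    simp only [List.foldl_cons]
    rcases ih (min d a) with h | ⟨b, hb, h⟩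
    · by_cases hda : d ≤ a
      · left; rw [h, min_eq_left hda]
      · right; exact ⟨a, by simp, by rw [h, min_eq_right (by omega)]⟩
    · right; exact ⟨b, by simp [hb], h⟩

theorem pvDMin_nonneg (cols : PySem.Dict (Int × Int) (PySem.Dict Int Int))
    (coords : List (Int × Int × Int)) : 0 ≤ pvDMin cols coords := by
  cases coords with
  | nil => exact le_refl 0
  | cons c cs =>
    simp only [pvDMin]
    rw [pv_foldl_min_comp]
    apply pv_foldl_min_nonneg
    · intro a ha
      rcases List.mem_map.mp ha with ⟨c', _, rfl⟩
      exact pvDSpec_nonneg _ _ _ _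
    · exact pvDSpec_nonneg _ _ _ _

theorem pvDMin_le_mem (cols : PySem.Dict (Int × Int) (PySem.Dict Int Int))
    (coords : List (Int × Int × Int)) (c : Int × Int × Int) (hc : c ∈ coords) :
    pvDMin cols coords ≤ pvDSpec cols c.1 c.2.1 c.2.2 := by
  cases coords with
  | nil => cases hc
  | cons c0 cs =>
    simp only [pvDMin]
    rw [pv_foldl_min_comp]
    rcases List.mem_cons.mp hc with h | h
    · subst h
      exact pv_foldl_min_le_init _ _
    · exact pv_foldl_min_le_mem _ _ _ (List.mem_map.mpr ⟨c, h, rfl⟩)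

theorem pvDMin_attains (cols : PySem.Dict (Int × Int) (PySem.Dict Int Int))
    (coords : List (Int × Int × Int)) (h : coords ≠ []) :
    ∃ c ∈ coords, pvDMin cols coords = pvDSpec cols c.1 c.2.1 c.2.2 := by
  cases coords with
  | nil => exact absurd rfl h
  | cons c0 cs =>
    simp only [pvDMin]
    rw [pv_foldl_min_comp]
    rcases pv_foldl_min_attains (cs.map (fun c' => pvDSpec cols c'.1 c'.2.1 c'.2.2))
        (pvDSpec cols c0.1 c0.2.1 c0.2.2) with h | ⟨a, ha, h⟩
    · exact ⟨c0, by simp, h⟩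
    · rcases List.mem_map.mp ha with ⟨c', hc', rfl⟩
      exact ⟨c', by simp [hc'], h⟩

theorem pvDropB_eq_dMin (cols : PySem.Dict (Int × Int) (PySem.Dict Int Int))
    (brick : List (Int × Int × Int)) (h : brick ≠ []) :
    pvDropB cols brick = some (pvDMin cols brick) := by
  have key : ∀ (cs : List (Int × Int × Int)) (v : Int),
      cs.foldl (fun acc c =>
        let d := pvDCellB cols c.1 c.2.1 c.2.2
        match acc with
        | none => some d
        | some dr => some (if d < dr then d else dr)) (some v)
        = some (cs.foldl (fun m c => min m (pvDSpec cols c.1 c.2.1 c.2.2)) v) := by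
    intro cs
    induction cs with
    | nil => intro v; rfl
    | cons c cs ih =>
      intro v
      simp only [List.foldl_cons]
      rw [ih]
      congr 1
      rw [pvDCellB_eq_dSpec]
      by_cases hlt : pvDSpec cols c.1 c.2.1 c.2.2 < v
      · rw [if_pos hlt, min_eq_right (by omega)]
      · rw [if_neg hlt, min_eq_left (by omega)]
  cases brick with
  | nil => exact absurd rfl h
  | cons c cs =>
    unfold pvDropB pvDMin
    simp only [List.foldl_cons]
    rw [show some (pvDCellB cols c.1 c.2.1 c.2.2) = some (pvDSpec cols c.1 c.2.1 c.2.2) by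
      rw [pvDCellB_eq_dSpec]]
    exact key cs _

theorem pvPassA_scan (i : Int) (occ : PySem.Set (Int × Int × Int))
    (cbm : PySem.Dict (Int × Int × Int) Int)
    (cols : PySem.Dict (Int × Int) (PySem.Dict Int Int)) (hinv : pvInv occ cbm cols) :
    ∀ (coords acc : List (Int × Int × Int)) (cd : Bool) (sb sp : PySem.Dict Int (PySem.Set Int)),
      (pvPassA i occ cbm cd coords acc sb sp).2.2 = pvScanB i cols coords sb sp := by
  intro coords
  induction coords with
  | nil => intro acc cd sb sp; rfl
  | cons c rest ih =>
    intro acc cd sb sp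
    obtain ⟨x, y, z⟩ := c
    have hgc := (hinv x y (z - 1)).1
    have hcc := (hinv x y (z - 1)).2
    simp only [pvPassA, pvScanB]
    by_cases hz : z - 1 < 1
    · rw [if_pos hz, if_pos hz]
    · rw [if_neg hz, if_neg hz]
      by_cases hocc : PySem.Set.contains occ (x, y, z - 1) = true
      · rw [if_pos hocc]
        rw [hocc] at hcc
        unfold pvLook at hcc hgc
        cases hlook : ((cols.get? (x, y)).getD PySem.Dict.empty).get? (z - 1) with
        | none => rw [hlook] at hcc; simp at hcc
        | some j =>
          rw [hlook] at hgc
          rw [hgc]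
          simp only [Option.getD_some]
          exact ih _ _ _ _
      · rw [if_neg hocc]
        have : PySem.Set.contains occ (x, y, z - 1) = false := by
          cases hb : PySem.Set.contains occ (x, y, z - 1)
          · rfl
          · exact absurd hb hocc
        rw [this] at hcc
        unfold pvLook at hcc
        cases hlook : ((cols.get? (x, y)).getD PySem.Dict.empty).get? (z - 1) with
        | none => exact ih _ _ _ _
        | some j => rw [hlook] at hcc; simp at hcc

theorem pvSet_contains_iff {α : Type} [BEq α] [LawfulBEq α] (s : PySem.Set α) (q : α) :
    PySem.Set.contains s q = true ↔ q ∈ s := by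
  simp [PySem.Set.contains]

theorem pvSet_contains_add_iff {α : Type} [BEq α] [LawfulBEq α] (s : PySem.Set α) (x q : α) :
    PySem.Set.contains (PySem.Set.add s x) q = true ↔ q ∈ s ∨ q = x := by
  rw [pvSet_contains_iff]
  exact PySem.Set.mem_add s x q

theorem pvPassA_clear (i : Int) (occ : PySem.Set (Int × Int × Int))
    (cbm : PySem.Dict (Int × Int × Int) Int) :
    ∀ (coords acc : List (Int × Int × Int)) (cd : Bool) (sb sp : PySem.Dict Int (PySem.Set Int)),
      (∀ c ∈ coords, ¬(c.2.2 - 1 < 1) ∧ PySem.Set.contains occ (c.1, c.2.1, c.2.2 - 1) = false) →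
      pvPassA i occ cbm cd coords acc sb sp
        = (cd, acc ++ coords.map (fun c => (c.1, c.2.1, c.2.2 - 1)), sb, sp) := by
  intro coords
  induction coords with
  | nil => intro acc cd sb sp _; simp [pvPassA]
  | cons c rest ih =>
    intro acc cd sb sp h
    obtain ⟨x, y, z⟩ := c
    have hc := h (x, y, z) (by simp)
    simp only at hc
    simp only [pvPassA]
    rw [if_neg hc.1, if_neg (by rw [hc.2]; simp)]
    rw [ih _ _ _ _ (fun c hcm => h c (by simp [hcm]))]
    simp only [List.map_cons, List.append_assoc, List.singleton_append]

theorem pvPassA_true_cells (i : Int) (occ : PySem.Set (Int × Int × Int))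
    (cbm : PySem.Dict (Int × Int × Int) Int) :
    ∀ (coords acc : List (Int × Int × Int)) (cd : Bool) (sb sp : PySem.Dict Int (PySem.Set Int)),
      (pvPassA i occ cbm cd coords acc sb sp).1 = true →
      ∀ c ∈ coords, ¬(c.2.2 - 1 < 1) ∧ PySem.Set.contains occ (c.1, c.2.1, c.2.2 - 1) = false := by
  intro coords
  induction coords with
  | nil => intro acc cd sb sp _ c hc; cases hc
  | cons c0 rest ih =>
    intro acc cd sb sp h c hc
    obtain ⟨x, y, z⟩ := c0
    simp only [pvPassA] at h
    split at h
    · simp at h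
    · split at h
      · rw [pvPassA_false] at h; simp at h
      · rename_i hz hocc
        rcases List.mem_cons.mp hc with hc | hc
        · subst hc
          refine ⟨hz, ?_⟩
          cases hb : PySem.Set.contains occ (x, y, z - 1)
          · rfl
          · exact absurd hb hocc
        · exact ih _ _ _ _ h c hc

theorem pv_min_sub_one (a b : Int) : min (a - 1) (b - 1) = min a b - 1 := by
  rcases le_total a b with h | h
  · rw [min_eq_left (by omega), min_eq_left h]
  · rw [min_eq_right (by omega), min_eq_right h]

theorem pv_foldl_min_sub_one :
    ∀ (l : List Int) (d : Int), (l.map (fun a => a - 1)).foldl min (d - 1) = l.foldl min d - 1 := by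
  intro l
  induction l with
  | nil => intro d; rfl
  | cons a l ih =>
    intro d
    simp only [List.map_cons, List.foldl_cons, pv_min_sub_one]
    exact ih _

theorem pvDMin_shift (cols : PySem.Dict (Int × Int) (PySem.Dict Int Int))
    (coords : List (Int × Int × Int)) (hne : coords ≠ [])
    (h : ∀ c ∈ coords, pvDSpec cols c.1 c.2.1 (c.2.2 - 1) = pvDSpec cols c.1 c.2.1 c.2.2 - 1) :
    pvDMin cols (coords.map (fun c => (c.1, c.2.1, c.2.2 - 1))) = pvDMin cols coords - 1 := by
  cases coords with
  | nil => exact absurd rfl hne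
  | cons c cs =>
    simp only [List.map_cons, pvDMin]
    rw [pv_foldl_min_comp, pv_foldl_min_comp, List.map_map]
    have hmaps : cs.map ((fun c' => pvDSpec cols c'.1 c'.2.1 c'.2.2) ∘
        (fun c => (c.1, c.2.1, c.2.2 - 1)))
        = (cs.map (fun c' => pvDSpec cols c'.1 c'.2.1 c'.2.2)).map (fun a => a - 1) := by
      rw [List.map_map]
      apply List.map_congr_left
      intro c' hc'
      exact h c' (by simp [hc'])
    rw [hmaps]
    have hinit : pvDSpec cols c.1 c.2.1 (c.2.2 - 1) = pvDSpec cols c.1 c.2.1 c.2.2 - 1 :=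
      h c (by simp)
    simp only [hinit]
    exact pv_foldl_min_sub_one _ _

theorem pv_map_subZ_zero :
    ∀ (coords : List (Int × Int × Int)),
      coords.map (fun c => (c.1, c.2.1, c.2.2 - (0 : Int))) = coords := by
  intro coords
  have : (fun (c : Int × Int × Int) => (c.1, c.2.1, c.2.2 - (0 : Int))) = fun c => c := by
    funext c; simp
  rw [this]
  exact List.map_id' coords

theorem pvSettleA_eq (i : Int) (occ : PySem.Set (Int × Int × Int))
    (cbm : PySem.Dict (Int × Int × Int) Int)
    (cols : PySem.Dict (Int × Int) (PySem.Dict Int Int)) (hinv : pvInv occ cbm cols) :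
    ∀ (n : Nat) (coords : List (Int × Int × Int)) (sb sp : PySem.Dict Int (PySem.Set Int)),
      coords ≠ [] → (pvDMin cols coords).toNat = n →
      pvSettleA i occ cbm coords sb sp =
        (coords.map (fun c => (c.1, c.2.1, c.2.2 - pvDMin cols coords)),
         pvScanB i cols (coords.map (fun c => (c.1, c.2.1, c.2.2 - pvDMin cols coords))) sb sp) := by
  intro n
  induction n with
  | zero =>
    intro coords sb sp hne h0
    have hD : pvDMin cols coords = 0 := by
      have := pvDMin_nonneg cols coords; omega
    obtain ⟨c0, hc0m, hc0⟩ := pvDMin_attains cols coords hne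
    rw [hD] at hc0
    cases coords with
    | nil => exact absurd rfl hne
    | cons c cs =>
      rw [pvSettleA]
      have hflag : (pvPassA i occ cbm true (c :: cs) [] sb sp).1 ≠ true := by
        intro ht
        have hcond := pvPassA_true_cells i occ cbm (c :: cs) [] true sb sp ht c0 hc0m
        have hlook : (pvLook cols c0.1 c0.2.1 (c0.2.2 - 1)).isSome = false := by
          rw [← (hinv c0.1 c0.2.1 (c0.2.2 - 1)).2]
          exact hcond.2
        rw [pvDSpec, if_neg hcond.1, if_neg (by rw [hlook]; simp)] at hc0
        have := pvDSpec_nonneg cols c0.1 c0.2.1 (c0.2.2 - 1 - 1 + 1 - 1)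
        have := pvDSpec_nonneg cols c0.1 c0.2.1 (c0.2.2 - 1)
        omega
      rw [dif_neg hflag]
      rw [hD, pv_map_subZ_zero]
      rw [pvPassA_scan i occ cbm cols hinv (c :: cs) [] true sb sp]
  | succ n ih =>
    intro coords sb sp hne hn
    have hD1 : 1 ≤ pvDMin cols coords := by
      have := pvDMin_nonneg cols coords; omega
    have hcond : ∀ c ∈ coords, ¬(c.2.2 - 1 < 1)
        ∧ PySem.Set.contains occ (c.1, c.2.1, c.2.2 - 1) = false
        ∧ pvDSpec cols c.1 c.2.1 (c.2.2 - 1) = pvDSpec cols c.1 c.2.1 c.2.2 - 1 := by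
      intro c hc
      have hge : 1 ≤ pvDSpec cols c.1 c.2.1 c.2.2 :=
        le_trans hD1 (pvDMin_le_mem cols coords c hc)
      by_cases hz : c.2.2 - 1 < 1
      · rw [pvDSpec, if_pos hz] at hge; omega
      · by_cases hl : (pvLook cols c.1 c.2.1 (c.2.2 - 1)).isSome = true
        · rw [pvDSpec, if_neg hz, if_pos hl] at hge; omega
        · refine ⟨hz, ?_, ?_⟩
          · rw [(hinv c.1 c.2.1 (c.2.2 - 1)).2]
            cases hb : (pvLook cols c.1 c.2.1 (c.2.2 - 1)).isSome
            · rfl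
            · exact absurd hb hl
          · conv_rhs => rw [pvDSpec]
            rw [if_neg hz, if_neg hl]
            omega
    cases coords with
    | nil => exact absurd rfl hne
    | cons c cs =>
      rw [pvSettleA]
      have hpass := pvPassA_clear i occ cbm (c :: cs) [] true sb sp
        (fun c hc => ⟨(hcond c hc).1, (hcond c hc).2.1⟩)
      rw [hpass]
      simp only [List.nil_append]
      have hshift := pvDMin_shift cols (c :: cs) hne (fun c hc => (hcond c hc).2.2)
      have hne2 : (c :: cs).map (fun c => (c.1, c.2.1, c.2.2 - 1)) ≠ [] := by simp
      have hn2 : (pvDMin cols ((c :: cs).map (fun c => (c.1, c.2.1, c.2.2 - 1)))).toNat = n := by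
        rw [hshift]; omega
      rw [dif_pos (by trivial)]
      rw [ih _ sb sp hne2 hn2]
      rw [hshift]
      have hmm : (((c :: cs).map (fun c => (c.1, c.2.1, c.2.2 - 1))).map
            (fun c' => (c'.1, c'.2.1, c'.2.2 - (pvDMin cols (c :: cs) - 1))))
          = (c :: cs).map (fun c' => (c'.1, c'.2.1, c'.2.2 - pvDMin cols (c :: cs))) := by
        rw [List.map_map]
        apply List.map_congr_left
        intro a _
        simp only [Function.comp, Prod.mk.injEq]
        exact ⟨trivial, trivial, by ring⟩
      rw [hmm]

theorem pvInv_step (i : Int) (c : Int × Int × Int) (occ : PySem.Set (Int × Int × Int))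
    (cbm : PySem.Dict (Int × Int × Int) Int)
    (cols : PySem.Dict (Int × Int) (PySem.Dict Int Int)) (h : pvInv occ cbm cols) :
    pvInv (PySem.Set.add occ c) (cbm.insert c i)
      (cols.insert (c.1, c.2.1) ((cols.getD (c.1, c.2.1) PySem.Dict.empty).insert c.2.2 i)) := by
  intro x y z
  have hold := h x y z
  -- the new lookup, fully case-analysed
  have hlook : pvLook (cols.insert (c.1, c.2.1)
        ((cols.getD (c.1, c.2.1) PySem.Dict.empty).insert c.2.2 i)) x y z
      = if (x, y, z) = c then some i else pvLook cols x y z := by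
    unfold pvLook
    rw [PySem.Dict.get?_insert]
    by_cases hxy : ((x, y) : Int × Int) = (c.1, c.2.1)
    · rw [if_pos hxy]
      simp only [Option.getD_some]
      rw [PySem.Dict.get?_insert, PySem.Dict.getD_eq_get?_getD]
      by_cases hz : z = c.2.2
      · rw [if_pos hz, if_pos (by
          obtain ⟨cx, cy, cz⟩ := c
          simp only [Prod.mk.injEq] at hxy ⊢
          exact ⟨hxy.1, hxy.2, hz⟩)]
      · rw [if_neg hz, if_neg (by
          obtain ⟨cx, cy, cz⟩ := c
          simp only [Prod.mk.injEq]
          intro hcon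
          exact hz hcon.2.2), hxy]
    · rw [if_neg hxy, if_neg (by
        obtain ⟨cx, cy, cz⟩ := c
        simp only [Prod.mk.injEq] at hxy ⊢
        intro hcon
        exact hxy ⟨hcon.1, hcon.2.1⟩)]
  constructor
  · rw [hlook, PySem.Dict.get?_insert]
    split
    · rfl
    · exact hold.1
  · rw [hlook]
    by_cases hq : ((x, y, z) : Int × Int × Int) = c
    · rw [if_pos hq, Option.isSome_some]
      exact (pvSet_contains_add_iff occ c (x, y, z)).mpr (Or.inr hq)
    · rw [if_neg hq, ← hold.2]
      cases hb : PySem.Set.contains occ (x, y, z)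
      · cases hb2 : PySem.Set.contains (PySem.Set.add occ c) (x, y, z)
        · rfl
        · rcases (pvSet_contains_add_iff occ c (x, y, z)).mp hb2 with hm | hm
          · rw [(pvSet_contains_iff occ (x, y, z)).mpr hm] at hb; cases hb
          · exact absurd hm hq
      · exact (pvSet_contains_add_iff occ c (x, y, z)).mpr
          (Or.inl ((pvSet_contains_iff occ (x, y, z)).mp hb))

theorem pvInv_place (i : Int) :
    ∀ (cells : List (Int × Int × Int)) (occ : PySem.Set (Int × Int × Int))
      (cbm : PySem.Dict (Int × Int × Int) Int)
      (cols : PySem.Dict (Int × Int) (PySem.Dict Int Int)), pvInv occ cbm cols →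
      pvInv (cells.foldl (fun (oc : PySem.Set (Int × Int × Int) × PySem.Dict (Int × Int × Int) Int) c =>
              (PySem.Set.add oc.1 c, oc.2.insert c i)) (occ, cbm)).1
            (cells.foldl (fun (oc : PySem.Set (Int × Int × Int) × PySem.Dict (Int × Int × Int) Int) c =>
              (PySem.Set.add oc.1 c, oc.2.insert c i)) (occ, cbm)).2
            (pvPlaceB i cols cells) := by
  intro cells
  induction cells with
  | nil => intro occ cbm cols h; exact h
  | cons c cells ih =>
    intro occ cbm cols h
    simp only [List.foldl_cons, pvPlaceB] at *
    exact ih _ _ _ (pvInv_step i c occ cbm cols h)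

theorem pvLoop_eq :
    ∀ (items : List (Int × List (Int × Int × Int))) (nb : List (List (Int × Int × Int)))
      (occ : PySem.Set (Int × Int × Int)) (cbm : PySem.Dict (Int × Int × Int) Int)
      (cols : PySem.Dict (Int × Int) (PySem.Dict Int Int))
      (sb sp : PySem.Dict Int (PySem.Set Int)),
      pvInv occ cbm cols → (∀ p ∈ items, p.2 ≠ []) →
      pvLoopA items nb occ cbm sb sp = pvLoopB items nb cols sb sp := by
  intro items
  induction items with
  | nil => intro nb occ cbm cols sb sp _ _; rfl
  | cons p rest ih =>
    intro nb occ cbm cols sb sp hinv hne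
    obtain ⟨i, brick⟩ := p
    have hbne : brick ≠ [] := hne (i, brick) (by simp)
    simp only [pvLoopA, pvLoopB]
    rw [pvSettleA_eq i occ cbm cols hinv (pvDMin cols brick).toNat brick sb sp hbne rfl]
    rw [pvDropB_eq_dMin cols brick hbne]
    simp only [Option.getD_some]
    rw [ih _ _ _ _ _ _
      (pvInv_place i (brick.map (fun c => (c.1, c.2.1, c.2.2 - pvDMin cols brick))) occ cbm cols hinv)
      (fun q hq => hne q (by simp [hq]))]

-- ===== VERDICT (by name: the statement is the Claim_ definition above) =====
theorem dropBricks_spec : Claim_equal_dropBricks := by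
  intro bricks _hdom hpre
  unfold Spec_dropBricks dropBricks dropBricks_alt
  have hinit : pvInitA (bricks.length : Int) = pvInitB (bricks.length : Int) := rfl
  have hinv : pvInv PySem.Set.empty PySem.Dict.empty PySem.Dict.empty := by
    intro x y z
    constructor
    · rw [PySem.Dict.get?_empty]
      unfold pvLook
      rw [PySem.Dict.get?_empty]
      rfl
    · rfl
  have hitems : ∀ p ∈ PySem.List.enumerate bricks, p.2 ≠ [] := by
    intro p hp
    rcases (PySem.List.mem_enumerate_iff bricks 0 p).mp hp with ⟨k, hk, rfl⟩
    exact hpre _ (List.getElem_mem hk)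
  rw [hinit]
  simp only [pvLoop_eq _ _ _ _ _ _ _ hinv hitems]
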